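-- pv_equiv track=rewrite | github.com/Klaudia1303/student_code_analysis | Progetto-tirocinio2024/data/student_data/2064116_Traini/LabPython08/A_Ex3.py | A_Ex3
-- ===== SOURCE A (Python) =====
-- def A_Ex3(l):
--     pippo=set()
--     for i in l:
--         for j in l:
--             if len(i)==len(j) and j!=i:
--                 paperopoli=j,i
--                 pippo.add(paperopoli)
--     return pippo
-- ===== SOURCE B (Python) =====
-- def A_Ex3(l):
--     buckets = {}
--     for x in l:
--         buckets.setdefault(len(x), []).append(x)
--     pippo = set()
--     for i in l:
--         for j in buckets[len(i)]:
--             if j != i: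
--                 pippo.add((j, i))
--     return pippo
-- ===== Notes on version B (the rewrite author's own statement) =====
-- stated objective: alternative
-- what changed: B builds a length-indexed bucket dict in one pass, then pairs each element only with its same-length bucket, replacing A's all-pairs double scan with n^2 len() calls.
import Mathlib
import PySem

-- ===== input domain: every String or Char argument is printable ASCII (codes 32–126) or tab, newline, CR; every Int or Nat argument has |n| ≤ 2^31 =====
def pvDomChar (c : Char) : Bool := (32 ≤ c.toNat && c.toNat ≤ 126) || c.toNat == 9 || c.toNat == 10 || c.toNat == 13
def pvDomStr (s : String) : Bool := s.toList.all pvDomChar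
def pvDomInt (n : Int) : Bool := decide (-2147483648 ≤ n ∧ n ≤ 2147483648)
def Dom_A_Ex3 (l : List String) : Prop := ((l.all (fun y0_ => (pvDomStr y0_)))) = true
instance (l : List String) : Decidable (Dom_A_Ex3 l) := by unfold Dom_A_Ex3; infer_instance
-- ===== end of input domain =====

-- B indexes the elements by length once (dict len -> occurrences) and then pairs each
-- element with its same-length bucket, instead of A's all-pairs double scan (objective: alternative).


-- ===== PORT A =====
def A_Ex3 (l : List String) : List (String × String) :=
  l.foldl (fun pippo i =>
    l.foldl (fun pippo j =>
      if PySem.Str.len i == PySem.Str.len j && j != i then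
        PySem.Set.add pippo (j, i)
      else pippo) pippo) PySem.Set.empty

-- ===== PORT B =====
def A_Ex3_alt (l : List String) : List (String × String) :=
  let buckets : PySem.Dict Int (List String) :=
    l.foldl (fun d x => d.modify (PySem.Str.len x) [] (· ++ [x])) PySem.Dict.empty
  l.foldl (fun pippo i =>
    (buckets.getD (PySem.Str.len i) []).foldl (fun pippo j =>
      if j != i then PySem.Set.add pippo (j, i) else pippo) pippo) PySem.Set.empty

-- ===== PRECONDITION & SPEC =====
def Spec_A_Ex3 (l : List String) (out : List (String × String)) : Prop := out = A_Ex3_alt l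
instance (l : List String) (out : List (String × String)) : Decidable (Spec_A_Ex3 l out) := by unfold Spec_A_Ex3; infer_instance

-- ===== CLAIM (what is proved, stated in full; the proofs are below) =====
def Claim_equal_A_Ex3 : Prop := ∀ (l : List String), Dom_A_Ex3 l → Spec_A_Ex3 l (A_Ex3 l)

-- ===== LEMMAS AND PROOFS =====

-- The bucket built by B's first loop at key L is exactly the sublist of l with that length.
theorem bucket_getD (l : List String) (d : PySem.Dict Int (List String)) (L : Int) :
    (l.foldl (fun d x => d.modify (PySem.Str.len x) [] (· ++ [x])) d).getD L []
      = d.getD L [] ++ l.filter (fun x => PySem.Str.len x == L) := by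
  induction l generalizing d with
  | nil => simp
  | cons x xs ih =>
    simp only [List.foldl_cons, List.filter_cons, ih, PySem.Dict.getD_modify]
    by_cases h : L = (x.length : Int)
    · simp [PySem.Str.len, h]
    · simp [PySem.Str.len, h]; omega

-- A's inner scan over the whole list equals a scan over the same-length sublist.
theorem inner_filter (i : String) (xs : List String) (s : PySem.Set (String × String)) :
    xs.foldl (fun pippo j =>
        if PySem.Str.len i == PySem.Str.len j && j != i then
          PySem.Set.add pippo (j, i) else pippo) s
      = (xs.filter (fun x => PySem.Str.len x == PySem.Str.len i)).foldl (fun pippo j =>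
          if j != i then PySem.Set.add pippo (j, i) else pippo) s := by
  induction xs generalizing s with
  | nil => rfl
  | cons x xs ih =>
    simp only [List.foldl_cons, List.filter_cons]
    by_cases h : x.length = i.length
    · have h1 : (PySem.Str.len i == PySem.Str.len x) = true := by simp [PySem.Str.len, h]
      have h2 : (PySem.Str.len x == PySem.Str.len i) = true := by simp [PySem.Str.len, h]
      rw [h1, h2]
      simp only [Bool.true_and, if_true, List.foldl_cons]
      exact ih _
    · have h1 : (PySem.Str.len i == PySem.Str.len x) = false := by
        simp [PySem.Str.len]; omega
      have h2 : (PySem.Str.len x == PySem.Str.len i) = false := by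
        simp [PySem.Str.len]; omega
      rw [h1, h2]
      simp only [Bool.false_and, if_false, Bool.false_eq_true]
      exact ih s

-- ===== VERDICT (by name: the statement is the Claim_ definition above) =====
theorem A_Ex3_spec : Claim_equal_A_Ex3 := by
  intro l _
  unfold Spec_A_Ex3 A_Ex3 A_Ex3_alt
  simp only []
  congr 1
  funext pippo i
  rw [bucket_getD, PySem.Dict.getD_empty, List.nil_append, inner_filter]
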